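-- pv_equiv track=rewrite | github.com/TheEnderek0/MaturaInf | 2023/zad_2_1.py | Bloki
-- ===== SOURCE A (Python) =====
-- def Bloki(x: int):
--
--     ilosc = 0
--     r = -1
--     while x > 0:
--         r_new = x % 2
--         x //= 2
--
--         if r != r_new:
--             r = r_new
--             ilosc = ilosc + 1
--
--     return ilosc
-- ===== SOURCE B (Python) =====
-- def Bloki(x: int):
--     if x <= 0:
--         return 0
--     return bin(x ^ (x >> 1)).count("1")
-- ===== Notes on version B (the rewrite author's own statement) =====
-- stated objective: idiomatic
-- what changed: Replaces the explicit transition-counting division loop with the closed-form bit trick: the number of equal-bit blocks of x>0 is the popcount of x XOR (x>>1).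
import Mathlib
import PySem

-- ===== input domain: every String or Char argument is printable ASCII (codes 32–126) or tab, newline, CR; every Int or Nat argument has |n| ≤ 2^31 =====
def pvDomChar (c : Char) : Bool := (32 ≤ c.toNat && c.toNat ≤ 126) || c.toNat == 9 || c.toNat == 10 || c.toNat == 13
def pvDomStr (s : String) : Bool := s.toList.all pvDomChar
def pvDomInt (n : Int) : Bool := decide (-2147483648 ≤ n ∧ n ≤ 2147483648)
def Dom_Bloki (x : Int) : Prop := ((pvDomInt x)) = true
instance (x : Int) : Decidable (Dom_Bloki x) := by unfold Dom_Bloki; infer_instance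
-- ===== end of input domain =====

-- B replaces A's transition-counting division loop by the closed-form bit trick
-- popcount (x XOR (x >> 1)) for x > 0 (same value, like cost; objective: idiomatic).

-- ===== PORT A =====
-- the while loop of A, step for step: state (x, r, ilosc)
def BlokiLoop (x r ilosc : Int) : Int :=
  if h : x > 0 then
    let r_new := PySem.Int.mod x 2
    let x' := PySem.Int.floordiv x 2
    if r ≠ r_new then BlokiLoop x' r_new (ilosc + 1) else BlokiLoop x' r ilosc
  else ilosc
termination_by x.toNat
decreasing_by
  all_goals
    simp only [PySem.Int.floordiv_eq_ediv_of_pos (by omega : (0:Int) < 2)]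
    omega

def Bloki (x : Int) : Int := BlokiLoop x (-1) 0

-- ===== PORT B =====
def Bloki_alt (x : Int) : Int :=
  if x ≤ 0 then 0
  else ((PySem.Int.bitCount (PySem.Int.bxor x (x >>> (1 : Nat)))) : Int)  -- bin(x ^ (x >> 1)).count("1")

-- ===== PRECONDITION & SPEC =====
def Spec_Bloki (x : Int) (out : Int) : Prop := out = Bloki_alt x
instance (x : Int) (out : Int) : Decidable (Spec_Bloki x out) := by unfold Spec_Bloki; infer_instance

-- ===== CLAIM (what is proved, stated in full; the proofs are below) =====
def Claim_equal_Bloki : Prop := ∀ (x : Int), Dom_Bloki x → Spec_Bloki x (Bloki x)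

-- ===== LEMMAS AND PROOFS =====

theorem pvXorDivTwo (a b : Nat) : (a ^^^ b) / 2 = (a / 2) ^^^ (b / 2) := by
  apply Nat.eq_of_testBit_eq
  intro i
  simp [Nat.testBit_div_two, Nat.testBit_xor]

theorem pvXorModTwo (a b : Nat) :
    (a ^^^ b) % 2 = (if a % 2 = b % 2 then 0 else 1) := by
  have h := @Nat.xor_mod_two_eq a b
  split_ifs with hif <;> omega

theorem pvXorNeZero (n : Nat) (hn : 0 < n) : n ^^^ n / 2 ≠ 0 := by
  intro h
  have : n = n / 2 := by
    have := Nat.xor_eq_zero_iff.mp h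
    exact this
  omega

-- recurrence of the popcount of n xor (n >> 1)
theorem pvFRec (n : Nat) (hn : 0 < n) :
    PySem.Int.bitCount ((n ^^^ n / 2 : Nat) : Int)
      = (if n % 2 = (n / 2) % 2 then 0 else 1)
        + PySem.Int.bitCount ((n / 2 ^^^ n / 2 / 2 : Nat) : Int) := by
  have h := PySem.Int.bitCount_natCast (Nat.pos_of_ne_zero (pvXorNeZero n hn))
  rw [h, pvXorModTwo, pvXorDivTwo]

theorem pvLoopZero (r c : Int) : BlokiLoop 0 r c = c := by
  rw [BlokiLoop]; norm_num

-- loop invariant: for positive n and any r, the loop adds the popcount of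
-- n xor (n >> 1), minus 1 when the pending bit r equals the low bit of n
theorem pvLoopSpec (n : Nat) (hn : 0 < n) : ∀ (r c : Int),
    BlokiLoop (n : Int) r c
      = c + (PySem.Int.bitCount ((n ^^^ n / 2 : Nat) : Int) : Int)
          - (if ((n % 2 : Nat) : Int) = r then 1 else 0) := by
  induction n using Nat.strong_induction_on with
  | _ n ih =>
    intro r c
    have hmod : PySem.Int.mod ((n : Int)) 2 = ((n % 2 : Nat) : Int) := by
      rw [PySem.Int.mod_eq_emod_of_pos (by omega)]; omega
    have hdiv : PySem.Int.floordiv ((n : Int)) 2 = ((n / 2 : Nat) : Int) := by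
      rw [PySem.Int.floordiv_eq_ediv_of_pos (by omega)]; omega
    have hx : ((n : Int) > 0) := by exact_mod_cast hn
    rw [BlokiLoop, dif_pos hx]
    simp only [hmod, hdiv]
    rw [pvFRec n hn]
    by_cases h2 : n / 2 = 0
    · have h1 : n = 1 := by omega
      subst h1
      have hb : PySem.Int.bitCount (((1 / 2 : Nat) ^^^ (1 / 2 / 2 : Nat) : Nat) : Int) = 0 := by
        decide
      have hz1 : (((1 : Nat) / 2 : Nat) : Int) = (0 : Int) := by norm_num
      by_cases hr : r = (((1 : Nat) % 2 : Nat) : Int)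
      · have h4 : (if (((1 : Nat) % 2 : Nat) : Int) = r then (1 : Int) else 0) = 1 :=
          if_pos hr.symm
        rw [if_neg (not_not_intro hr), h4, hz1, pvLoopZero, hb]
        norm_num
      · have h4 : (if (((1 : Nat) % 2 : Nat) : Int) = r then (1 : Int) else 0) = 0 :=
          if_neg (fun hh => hr hh.symm)
        rw [if_pos hr, h4, hz1, pvLoopZero, hb]
        norm_num
    · have hp2 : 0 < n / 2 := Nat.pos_of_ne_zero h2
      have ihh := ih (n / 2) (Nat.div_lt_self hn (by omega)) hp2
      by_cases hr : r = ((n % 2 : Nat) : Int)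
      · have h4 : (if ((n % 2 : Nat) : Int) = r then (1 : Int) else 0) = 1 := if_pos hr.symm
        rw [h4, if_neg (not_not_intro hr), ihh r c]
        split_ifs <;> omega
      · have h4 : (if ((n % 2 : Nat) : Int) = r then (1 : Int) else 0) = 0 :=
          if_neg (fun hh => hr hh.symm)
        rw [h4, if_pos hr, ihh _ (c + 1)]
        split_ifs <;> omega

theorem pvShiftOne (n : Nat) : ((n : Int) >>> (1 : Nat)) = ((n / 2 : Nat) : Int) := by
  have h : (n : Int) >>> (1 : Nat) = (n : Int) / 2 := by
    simp [Int.shiftRight_eq_div_pow]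
  rw [h]; omega

-- ===== VERDICT (by name: the statement is the Claim_ definition above) =====
theorem Bloki_spec : Claim_equal_Bloki := by
  intro x _
  unfold Spec_Bloki Bloki Bloki_alt
  by_cases hx : x ≤ 0
  · rw [BlokiLoop]
    simp [hx, show ¬ x > 0 by omega]
  · have hx0 : x = ((x.toNat : Nat) : Int) := by omega
    rw [if_neg hx]
    rw [hx0, pvShiftOne, PySem.Int.bxor_natCast]
    rw [pvLoopSpec x.toNat (by omega) (-1) 0]
    have hne : ¬ (((x.toNat % 2 : Nat) : Int) = -1) := by
      have h2 : x.toNat % 2 < 2 := Nat.mod_lt _ (by omega)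
      omega
    rw [if_neg hne]
    ring
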